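-- pv_equiv track=rewrite | github.com/candi888/atcoder2024 | library/old.py | nexlist
-- ===== SOURCE A (Python) =====
-- def nexlist(
--     s,
-- ):  # i文字目以降でjが登場する最小のidx、存在しなければn（配列の一つ外）を返す
--     n = len(s)
--
--     res = [[n for j in range(26)] for i in range(n + 1)]
--
--     for i in reversed(range(n)):
--         for j in range(26):
--             res[i][j] = res[i + 1][j]  # 一旦i+1番目を答えとしておく
--
--         res[i][ord(s[i]) - 97] = i  # i文字目の情報を反映
--
--     return res
-- ===== SOURCE B (Python) =====
-- def nexlist(s):
--     # Forward occurrence indexing + run-length column fill (no backward DP, no row copying).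
--     n = len(s)
--     occ = [[] for _ in range(26)]
--     for i in range(n):
--         occ[ord(s[i]) - 97].append(i)
--     cols = []
--     for j in range(26):
--         col = []
--         prev = 0
--         for p in occ[j]:
--             col.extend([p] * (p + 1 - prev))
--             prev = p + 1
--         col.extend([n] * (n + 1 - prev))
--         cols.append(col)
--     return [[cols[j][i] for j in range(26)] for i in range(n + 1)]
-- ===== Notes on version B (the rewrite author's own statement) =====
-- stated objective: alternative
-- what changed: B replaces A's backward DP (each of the n rows copied in full from the row below, then one slot overwritten) by a forward pass that builds a 26-entry occurrence-position index, then constructs each letter's column by run-length filling the gaps between consecutive occurrences, and gathers rows; there is no backward recurrence and no row copying.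
import Mathlib
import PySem

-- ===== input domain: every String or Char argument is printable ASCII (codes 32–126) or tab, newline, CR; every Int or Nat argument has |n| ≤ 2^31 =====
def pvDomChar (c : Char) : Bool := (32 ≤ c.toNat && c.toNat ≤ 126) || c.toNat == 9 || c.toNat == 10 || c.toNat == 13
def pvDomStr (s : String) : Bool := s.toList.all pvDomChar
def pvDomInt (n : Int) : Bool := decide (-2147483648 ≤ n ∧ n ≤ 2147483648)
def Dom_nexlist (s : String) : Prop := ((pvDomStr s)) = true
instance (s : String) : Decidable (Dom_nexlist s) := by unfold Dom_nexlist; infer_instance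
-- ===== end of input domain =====

-- B replaces A's backward row-copying DP by a forward occurrence index per letter plus a
-- run-length column fill gathered into rows (objective: alternative, same O(26*n) cost).


-- ===== PORT A =====
-- rows i..n of A's table: row i is a copy of row i+1 with slot ord(s[i])-97 set to i
-- (the Python assignment's negative-index wraparound is pySetD's).
def nexlistRows (cs : List Char) (i : Int) (n : Int) : List (List Int) :=
  match cs with
  | [] => [List.replicate 26 n]
  | c :: rest =>
      let tail := nexlistRows rest (i + 1) n
      PySem.List.pySetD (tail.headD []) ((c.toNat : Int) - 97) i :: tail

def nexlist (s : String) : List (List Int) :=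
  nexlistRows s.toList 0 (s.toList.length : Int)

-- ===== PORT B =====
-- occ = [[] for _ in range(26)]; for i in range(n): occ[ord(s[i])-97].append(i)
def occBuild (cs : List Char) : List (List Int) :=
  (PySem.List.enumerate cs 0).foldl
    (fun occ p =>
      PySem.List.pySetD occ ((p.2.toNat : Int) - 97)
        (PySem.List.pyGetD occ ((p.2.toNat : Int) - 97) [] ++ [p.1]))
    (List.replicate 26 [])

-- col = []; prev = 0; for p in ps: col += [p]*(p+1-prev); prev = p+1; col += [n]*(n+1-prev)
def colFill (ps : List Int) (n : Int) : List Int :=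
  let st := ps.foldl
    (fun (acc : List Int × Int) p =>
      (acc.1 ++ List.replicate (p + 1 - acc.2).toNat p, p + 1)) ([], 0)
  st.1 ++ List.replicate (n + 1 - st.2).toNat n

def nexlist_alt (s : String) : List (List Int) :=
  let cs := s.toList
  let n : Int := (cs.length : Int)
  let occ := occBuild cs
  let cols := (List.range 26).map (fun j => colFill (PySem.List.pyGetD occ ((j : Nat) : Int) []) n)
  (List.range (cs.length + 1)).map (fun i =>
    (List.range 26).map (fun j =>
      PySem.List.pyGetD (PySem.List.pyGetD cols ((j : Nat) : Int) []) ((i : Nat) : Int) n))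

-- ===== PRECONDITION & SPEC =====
-- Pre_ excludes exactly the strings on which A raises IndexError (a character with code < 71 or
-- > 122 makes ord(c)-97 an index outside [-26, 26) of a 26-element row); B raises there too.
def Pre_nexlist (s : String) : Prop := (s.toList.all (fun c => 71 ≤ c.toNat && c.toNat ≤ 122)) = true
instance (s : String) : Decidable (Pre_nexlist s) := by unfold Pre_nexlist; infer_instance
def pvWitness_nexlist : String := ("ab")

def Spec_nexlist (s : String) (out : List (List Int)) : Prop := out = nexlist_alt s
instance (s : String) (out : List (List Int)) : Decidable (Spec_nexlist s out) := by unfold Spec_nexlist; infer_instance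

-- ===== CLAIM (what is proved, stated in full; the proofs are below) =====
def Claim_equal_nexlist : Prop := ∀ (s : String), Dom_nexlist s → Pre_nexlist s → Spec_nexlist s (nexlist s)

-- ===== LEMMAS AND PROOFS =====
-- the row slot Python's index ord(c)-97 actually hits in a 26-list, for 71 ≤ ord(c) ≤ 122
def slot (c : Char) : Nat := (c.toNat - 71) % 26

-- the next index ≥ i whose character falls in slot j (n if none), on the suffix cs starting at i
def nextIdxS (cs : List Char) (i n : Int) (j : Nat) : Int :=
  match cs with
  | [] => n
  | c :: rest => if slot c = j then i else nextIdxS rest (i + 1) n j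

def rowSpec (cs : List Char) (i n : Int) : List Int :=
  (List.range 26).map (fun j => nextIdxS cs i n j)

-- occurrence positions of slot j in cs, offset by i, in increasing order
def occR (cs : List Char) (i : Int) (j : Nat) : List Int :=
  match cs with
  | [] => []
  | c :: rest => (if slot c = j then [i] else []) ++ occR rest (i + 1) j

-- first element ≥ i of ps (n if none)
def firstGE (ps : List Int) (i n : Int) : Int :=
  match ps with
  | [] => n
  | p :: rest => if i ≤ p then p else firstGE rest i n

-- structural form of colFill's loop
def fillRec (prev : Int) (ps : List Int) (n : Int) : List Int :=
  match ps with
  | [] => List.replicate (n + 1 - prev).toNat n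
  | p :: rest => List.replicate (p + 1 - prev).toNat p ++ fillRec (p + 1) rest n

theorem slot_lt (c : Char) : slot c < 26 := Nat.mod_lt _ (by norm_num)

-- Python's possibly-negative index ord(c)-97 on a 26-element list: set hits slot c
-- pySetD at a negative in-range index wraps from the end, as Python list assignment does
theorem pySetD_neg_natCast' {α : Type} (xs : List α) (k : Nat) (v : α) (h1 : 0 < k)
    (h2 : k ≤ xs.length) :
    PySem.List.pySetD xs (-(k : Int)) v = xs.set (xs.length - k) v := by
  simp only [PySem.List.pySetD, PySem.List.pySet?, PySem.List.pyIdx?]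
  rw [if_neg (by omega), if_pos (by omega)]
  simp only [Option.map_some, Option.getD_some]
  congr 1
  omega

theorem pySetD_slot {α : Type} (xs : List α) (c : Char) (v : α) (hlen : xs.length = 26)
    (hc : 71 ≤ c.toNat ∧ c.toNat ≤ 122) :
    PySem.List.pySetD xs ((c.toNat : Int) - 97) v = xs.set (slot c) v := by
  by_cases h : 97 ≤ c.toNat
  · rw [show ((c.toNat : Int) - 97) = (((c.toNat - 97 : Nat)) : Int) from by omega,
      PySem.List.pySetD_natCast]
    congr 1
    unfold slot
    omega
  · rw [show ((c.toNat : Int) - 97) = -(((97 - c.toNat : Nat)) : Int) from by omega,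
      pySetD_neg_natCast' xs _ v (by omega) (by omega)]
    congr 1
    unfold slot
    omega

theorem pyGetD_slot {α : Type} (xs : List α) (c : Char) (d : α) (hlen : xs.length = 26)
    (hc : 71 ≤ c.toNat ∧ c.toNat ≤ 122) :
    PySem.List.pyGetD xs ((c.toNat : Int) - 97) d = xs.getD (slot c) d := by
  have hslot : slot c < xs.length := by rw [hlen]; exact slot_lt c
  by_cases h : 97 ≤ c.toNat
  · rw [show ((c.toNat : Int) - 97) = (((c.toNat - 97 : Nat)) : Int) from by omega,
      PySem.List.pyGetD_natCast]
    congr 1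
    unfold slot
    omega
  · rw [show ((c.toNat : Int) - 97) = -(((97 - c.toNat : Nat)) : Int) from by omega,
      PySem.List.pyGetD_neg_natCast xs (97 - c.toNat) d (by omega) (by omega),
      List.getD_eq_getElem _ _ hslot]
    congr 1
    unfold slot
    omega

theorem set_map_range {α : Type} (f : Nat → α) (d : Nat) (v : α) (_hd : d < 26) :
    ((List.range 26).map f).set d v = (List.range 26).map (fun j => if j = d then v else f j) := by
  apply List.ext_getElem
  · simp
  · intro idx h1 h2
    simp only [List.getElem_set, List.getElem_map, List.getElem_range]
    split_ifs <;> first | rfl | omega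

-- ===== A side: nexlistRows computes rowSpec of each suffix =====
theorem rowsA_eq (cs : List Char) : ∀ (i n : Int), (∀ c ∈ cs, 71 ≤ c.toNat ∧ c.toNat ≤ 122) →
    nexlistRows cs i n
      = (List.range (cs.length + 1)).map (fun k => rowSpec (cs.drop k) (i + (k : Int)) n) := by
  induction cs with
  | nil =>
      intro i n _
      simp [nexlistRows, rowSpec, nextIdxS, List.map_const']
  | cons c rest ih =>
      intro i n hcs
      have hc : 71 ≤ c.toNat ∧ c.toNat ≤ 122 := hcs c (by simp)
      have hrest : ∀ x ∈ rest, 71 ≤ x.toNat ∧ x.toNat ≤ 122 := fun x hx => hcs x (by simp [hx])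
      simp only [nexlistRows]
      rw [ih (i + 1) n hrest]
      have hhead : ((List.range (rest.length + 1)).map
          (fun k => rowSpec (rest.drop k) (i + 1 + (k : Int)) n)).headD []
          = rowSpec rest (i + 1) n := by
        rw [List.range_succ_eq_map]
        simp
      rw [hhead]
      conv_rhs => rw [show (c :: rest).length + 1 = (rest.length + 1) + 1 from by simp,
        List.range_succ_eq_map]
      simp only [List.map_cons, List.map_map, List.drop_zero, Nat.cast_zero, add_zero]
      congr 1
      · rw [pySetD_slot _ c i (by simp [rowSpec]) hc]
        unfold rowSpec
        rw [set_map_range _ _ _ (slot_lt c)]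
        apply List.map_congr_left
        intro j hj
        simp only [nextIdxS]
        exact if_congr eq_comm rfl rfl
      · apply List.map_congr_left
        intro k _
        simp only [Function.comp_apply, Nat.succ_eq_add_one, List.drop_succ_cons]
        have harg : i + ((k + 1 : Nat) : Int) = (i + 1) + (k : Int) := by push_cast; ring
        rw [harg]

-- ===== B side, step 1: occBuild computes occR for each slot =====
theorem occR_append (xs ys : List Char) : ∀ (i : Int) (j : Nat),
    occR (xs ++ ys) i j = occR xs i j ++ occR ys (i + xs.length) j := by
  induction xs with
  | nil => intro i j; simp [occR]
  | cons c rest ih =>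
      intro i j
      simp only [List.cons_append, occR, ih, List.append_assoc, List.length_cons]
      have h : i + ((rest.length + 1 : Nat) : Int) = (i + 1) + (rest.length : Int) := by
        push_cast; ring
      rw [h]

theorem occBuild_append (cs : List Char) (c : Char) :
    occBuild (cs ++ [c])
      = PySem.List.pySetD (occBuild cs) ((c.toNat : Int) - 97)
          (PySem.List.pyGetD (occBuild cs) ((c.toNat : Int) - 97) [] ++ [(cs.length : Int)]) := by
  unfold occBuild
  rw [PySem.List.enumerate_append, List.foldl_append]
  simp [PySem.List.enumerate_cons, PySem.List.enumerate_nil]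

theorem occBuild_eq (cs : List Char) (h : ∀ c ∈ cs, 71 ≤ c.toNat ∧ c.toNat ≤ 122) :
    occBuild cs = (List.range 26).map (fun j => occR cs 0 j) := by
  induction cs using List.reverseRecOn with
  | nil => simp [occBuild, PySem.List.enumerate_nil, occR, List.map_const']
  | append_singleton cs c ih =>
      have hc : 71 ≤ c.toNat ∧ c.toNat ≤ 122 := h c (by simp)
      have hcs : ∀ x ∈ cs, 71 ≤ x.toNat ∧ x.toNat ≤ 122 := fun x hx => h x (by simp [hx])
      rw [occBuild_append, ih hcs]
      have hlen : ((List.range 26).map (fun j => occR cs 0 j)).length = 26 := by simp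
      rw [pyGetD_slot _ c [] hlen hc, pySetD_slot _ c _ hlen hc]
      have hget : ((List.range 26).map (fun j => occR cs 0 j)).getD (slot c) []
          = occR cs 0 (slot c) := by
        rw [List.getD_eq_getElem _ _ (by simp [slot_lt])]
        simp
      rw [hget, set_map_range _ _ _ (slot_lt c)]
      apply List.map_congr_left
      intro j hj
      rw [occR_append cs [c] 0 j]
      simp only [occR, zero_add, List.append_nil]
      split_ifs with h1 h2
      · subst h1; rfl
      · omega
      · omega
      · simp

-- ===== B side, step 2: colFill = fillRec =====
theorem colFill_loop (ps : List Int) : ∀ (col : List Int) (prev n : Int),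
    (let st := ps.foldl
        (fun (acc : List Int × Int) p =>
          (acc.1 ++ List.replicate (p + 1 - acc.2).toNat p, p + 1)) (col, prev)
     st.1 ++ List.replicate (n + 1 - st.2).toNat n) = col ++ fillRec prev ps n := by
  induction ps with
  | nil => intro col prev n; simp [fillRec]
  | cons p rest ih =>
      intro col prev n
      simp only [List.foldl_cons]
      rw [ih (col ++ List.replicate (p + 1 - prev).toNat p) (p + 1) n]
      simp [fillRec, List.append_assoc]

theorem colFill_eq_fillRec (ps : List Int) (n : Int) : colFill ps n = fillRec 0 ps n := by
  have h := colFill_loop ps [] 0 n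
  simpa [colFill] using h

-- ===== B side, step 3: fillRec yields firstGE at every index =====
theorem fillRec_spec (ps : List Int) : ∀ (prev n : Int),
    (∀ p ∈ ps, prev ≤ p ∧ p < n) → List.Pairwise (· < ·) ps → prev ≤ n →
    fillRec prev ps n
      = (List.range (n + 1 - prev).toNat).map (fun (k : Nat) => firstGE ps (prev + (k : Int)) n) := by
  induction ps with
  | nil =>
      intro prev n _ _ _
      simp [fillRec, firstGE, List.map_const']
  | cons p rest ih =>
      intro prev n hmem hpw hprev
      have hp : prev ≤ p ∧ p < n := hmem p (by simp)
      have hrest : ∀ q ∈ rest, p + 1 ≤ q ∧ q < n := by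
        intro q hq
        exact ⟨by have := (List.pairwise_cons.mp hpw).1 q hq; omega, (hmem q (by simp [hq])).2⟩
      have hcount : (n + 1 - prev).toNat = (p + 1 - prev).toNat + (n - p).toNat := by omega
      rw [hcount, List.range_add, List.map_append, List.map_map]
      simp only [fillRec]
      congr 1
      · -- first segment: replicate = map of constant p
        have : ∀ k ∈ List.range (p + 1 - prev).toNat,
            firstGE (p :: rest) (prev + (k : Int)) n = p := by
          intro k hk
          have hk' : k < (p + 1 - prev).toNat := List.mem_range.mp hk
          simp only [firstGE]
          rw [if_pos (by omega)]
        rw [List.map_congr_left this]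
        simp [List.map_const']
      · -- second segment: skip head, instance of ih at prev := p + 1
        rw [ih (p + 1) n hrest (List.pairwise_cons.mp hpw).2 (by omega)]
        have hn : (n + 1 - (p + 1)).toNat = (n - p).toNat := by omega
        rw [hn]
        apply List.map_congr_left
        intro k hk
        simp only [Function.comp_apply, firstGE]
        rw [if_neg (by
          have : prev + ((p + 1 - prev).toNat : Int) = p + 1 := by omega
          omega)]
        congr 1
        omega

-- ===== B side, step 4: firstGE over occR = nextIdxS =====
theorem occR_lb (cs : List Char) : ∀ (i : Int) (j : Nat) (p : Int),
    p ∈ occR cs i j → i ≤ p ∧ p < i + cs.length := by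
  induction cs with
  | nil => intro i j p hp; simp [occR] at hp
  | cons c rest ih =>
      intro i j p hp
      simp only [occR, List.mem_append] at hp
      rcases hp with hp | hp
      · split_ifs at hp with h
        · simp only [List.mem_singleton] at hp
          subst hp
          simp only [List.length_cons]
          constructor
          · omega
          · push_cast; omega
        · simp at hp
      · have := ih (i + 1) j p hp
        constructor <;> [omega; (simp; push_cast; omega)]

theorem occR_pairwise (cs : List Char) : ∀ (i : Int) (j : Nat),
    List.Pairwise (· < ·) (occR cs i j) := by
  induction cs with
  | nil => intro i j; simp [occR]
  | cons c rest ih =>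
      intro i j
      simp only [occR]
      split_ifs with h
      · simp only [List.singleton_append, List.pairwise_cons]
        exact ⟨fun q hq => by have := occR_lb rest (i + 1) j q hq; omega, ih (i + 1) j⟩
      · simpa using ih (i + 1) j

theorem firstGE_shift (ps : List Int) (i n : Int) (h : ∀ p ∈ ps, i + 1 ≤ p) :
    firstGE ps i n = firstGE ps (i + 1) n := by
  cases ps with
  | nil => rfl
  | cons p rest =>
      have := h p (by simp)
      simp only [firstGE]
      rw [if_pos (by omega), if_pos (by omega)]

theorem firstGE_occR (cs : List Char) : ∀ (i n : Int) (j : Nat),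
    firstGE (occR cs i j) i n = nextIdxS cs i n j := by
  induction cs with
  | nil => intro i n j; rfl
  | cons c rest ih =>
      intro i n j
      simp only [occR, nextIdxS]
      split_ifs with h
      · simp only [List.singleton_append, firstGE]
        rw [if_pos (by omega)]
      · simp only [List.nil_append]
        rw [firstGE_shift _ _ _ (fun p hp => (occR_lb rest (i + 1) j p hp).1), ih]

theorem firstGE_occR_drop (cs : List Char) : ∀ (i0 n : Int) (k : Nat) (j : Nat),
    firstGE (occR cs i0 j) (i0 + (k : Int)) n = nextIdxS (cs.drop k) (i0 + (k : Int)) n j := by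
  induction cs with
  | nil => intro i0 n k j; simp [occR, firstGE, nextIdxS]
  | cons c rest ih =>
      intro i0 n k j
      cases k with
      | zero => simpa using firstGE_occR (c :: rest) i0 n j
      | succ m =>
          have hskip : ∀ p ∈ occR (c :: rest) i0 j, p ∈ occR rest (i0 + 1) j ∨ p = i0 := by
            intro p hp
            simp only [occR, List.mem_append] at hp
            rcases hp with hp | hp
            · right; split_ifs at hp with h <;> simp at hp; omega
            · left; exact hp
          have harg : i0 + ((m + 1 : Nat) : Int) = (i0 + 1) + (m : Int) := by push_cast; ring
          simp only [List.drop_succ_cons, harg]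
          rw [← ih (i0 + 1) n m j]
          simp only [occR]
          split_ifs with h
      -- head i0 is below the threshold (i0+1)+m, so firstGE skips it
          · simp only [List.singleton_append, firstGE]
            rw [if_neg (by omega)]
          · simp

-- ===== VERDICT (by name: the statement is the Claim_ definition above) =====
theorem nexlist_spec : Claim_equal_nexlist := by
  unfold Claim_equal_nexlist
  intro s _ hp
  unfold Spec_nexlist
  unfold Pre_nexlist at hp
  have hpre : ∀ c ∈ s.toList, 71 ≤ c.toNat ∧ c.toNat ≤ 122 := by
    intro c hc
    have := List.all_eq_true.mp hp c hc
    simp only [Bool.and_eq_true, decide_eq_true_eq] at this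
    exact this
  show nexlistRows s.toList 0 (s.toList.length : Int) = _
  rw [rowsA_eq s.toList 0 _ hpre]
  simp only [nexlist_alt, PySem.List.pyGetD_natCast, occBuild_eq s.toList hpre]
  apply List.map_congr_left
  intro k hk
  have hk' : k < s.toList.length + 1 := List.mem_range.mp hk
  unfold rowSpec
  apply List.map_congr_left
  intro j hj
  have hj' : j < 26 := List.mem_range.mp hj
  rw [PySem.List.getD_map_range _ 26 j _ hj', PySem.List.getD_map_range _ 26 j _ hj',
    colFill_eq_fillRec,
    fillRec_spec (occR s.toList 0 j) 0 (s.toList.length : Int)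
      (fun p hp => by have := occR_lb s.toList 0 j p hp; omega)
      (occR_pairwise s.toList 0 j) (by omega),
    show (((s.toList.length : Int)) + 1 - 0).toNat = s.toList.length + 1 from by omega,
    PySem.List.getD_map_range _ _ k _ hk']
  have := firstGE_occR_drop s.toList 0 (s.toList.length : Int) k j
  simpa using this.symm
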